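-- pv_equiv track=rewrite | github.com/elsmirroad/Solutions | LeetCode/3877. Minimum Removals to Achieve Target XOR.py | minRemovals
-- ===== SOURCE A (Python) =====
-- from typing import List
--
-- def minRemovals(nums: List[int], target: int) -> int:
--     dp = {0:0}
--     for num in nums:
--         ns = dp.copy()
--         for xv, size in dp.items():
--             nx = xv ^ num
--             ns[nx] = max(ns.get(nx, 0), size + 1)
--         dp = ns
--     return -1 if target not in dp else len(nums) - dp[target]
-- ===== SOURCE B (Python) =====
-- from typing import List
--
-- def minRemovals(nums: List[int], target: int) -> int:
--     # top-down memoized recursion on the suffix: f(rest, needed) = max number of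
--     # elements of `rest` whose XOR is `needed`, or None if impossible
--     memo = {}
--
--     def f(rest, needed):
--         if not rest:
--             return 0 if needed == 0 else None
--         key = (len(rest), needed)
--         if key in memo:
--             return memo[key]
--         skip = f(rest[1:], needed)
--         take = f(rest[1:], needed ^ rest[0])
--         best = skip
--         if take is not None and (best is None or take + 1 > best):
--             best = take + 1
--         memo[key] = best
--         return best
--
--     best = f(nums, target)
--     return -1 if best is None else len(nums) - best
-- ===== Notes on version B (the rewrite author's own statement) =====
-- stated objective: alternative
-- what changed: Replaces A's forward iterative dict-DP (rebuilding the whole xor->max-size table for each element) by a top-down memoized recursion on the suffix: f(rest, needed) = max elements of rest xoring to needed (None if impossible), answer len(nums) - f(nums, target) or -1.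
import Mathlib
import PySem

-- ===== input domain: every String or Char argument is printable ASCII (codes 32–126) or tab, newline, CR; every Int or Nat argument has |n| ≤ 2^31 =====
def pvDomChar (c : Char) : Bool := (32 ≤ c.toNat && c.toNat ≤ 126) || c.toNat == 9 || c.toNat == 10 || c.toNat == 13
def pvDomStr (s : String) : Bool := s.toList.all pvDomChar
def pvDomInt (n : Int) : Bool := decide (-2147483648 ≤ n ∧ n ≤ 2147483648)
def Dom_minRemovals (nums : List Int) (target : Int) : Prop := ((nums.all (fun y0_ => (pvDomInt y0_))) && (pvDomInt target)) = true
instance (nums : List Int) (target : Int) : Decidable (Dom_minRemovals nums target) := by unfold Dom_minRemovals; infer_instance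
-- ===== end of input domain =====

-- B replaces A's forward iterative dict-DP by a top-down memoized recursion on the
-- suffix (a different decomposition of the same exact problem; no speed claim).

-- ===== PORT A =====
-- literal transliteration of A: dp = {0:0}; for num in nums: rebuild ns from dp.items(); final lookup
def minRemovals (nums : List Int) (target : Int) : Int :=
  let dp0 : PySem.Dict Int Int := PySem.Dict.ofList [(0, 0)]
  let dp := nums.foldl
    (fun dp num =>
      dp.items.foldl
        (fun ns p =>
          ns.insert (PySem.Int.bxor p.1 num)
            (max (ns.getD (PySem.Int.bxor p.1 num) 0) (p.2 + 1)))
        dp)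
    dp0
  if dp.contains target then (nums.length : Int) - dp.getD target 0 else -1

-- ===== PORT B =====
-- f(rest, needed) of Source B with the memo dict threaded through; returns (value, memo)
def altGo : List Int → Int → PySem.Dict (Int × Int) (Option Int) →
    Option Int × PySem.Dict (Int × Int) (Option Int)
  | [], needed, memo => (if needed = 0 then some 0 else none, memo)
  | num :: tl, needed, memo =>
    let key : Int × Int := (((num :: tl).length : Int), needed)
    match memo.get? key with
    | some v => (v, memo)
    | none =>
      let r1 := altGo tl needed memo
      let r2 := altGo tl (PySem.Int.bxor needed num) r1.2
      let best : Option Int :=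
        match r2.1, r1.1 with
        | some t, none => some (t + 1)
        | some t, some s => if t + 1 > s then some (t + 1) else some s
        | none, b => b
      (best, r2.2.insert key best)

def minRemovals_alt (nums : List Int) (target : Int) : Int :=
  match (altGo nums target PySem.Dict.empty).1 with
  | none => -1
  | some b => (nums.length : Int) - b

-- ===== PRECONDITION & SPEC =====
def Spec_minRemovals (nums : List Int) (target : Int) (out : Int) : Prop := out = minRemovals_alt nums target
instance (nums : List Int) (target : Int) (out : Int) : Decidable (Spec_minRemovals nums target out) := by unfold Spec_minRemovals; infer_instance

-- ===== CLAIM (what is proved, stated in full; the proofs are below) =====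
def Claim_equal_minRemovals : Prop := ∀ (nums : List Int) (target : Int), Dom_minRemovals nums target → Spec_minRemovals nums target (minRemovals nums target)

-- ===== LEMMAS AND PROOFS =====

-- xor facts (PySem has bxor_comm/bxor_self/bxor_zero but no associativity/cancellation)
theorem pvBxor_eq_ixor (a b : Int) : PySem.Int.bxor a b = Int.xor a b := by
  unfold PySem.Int.bxor
  rcases a with m | m <;> rcases b with n | n <;> simp [Int.negSucc_eq, Int.xor] <;> omega

theorem pvIxor_assoc (a b c : Int) : Int.xor (Int.xor a b) c = Int.xor a (Int.xor b c) := by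
  unfold Int.xor; rcases a with m | m <;> rcases b with n | n <;> rcases c with k | k <;>
    simp [Nat.xor_assoc]

theorem pvIxor_comm (a b : Int) : Int.xor a b = Int.xor b a := by
  unfold Int.xor; rcases a with m | m <;> rcases b with n | n <;> simp [Nat.xor_comm]

theorem pvBxor_cancel (a b : Int) : PySem.Int.bxor (PySem.Int.bxor a b) b = a := by
  have h1 : Int.xor b b = 0 := by rw [← pvBxor_eq_ixor]; simp
  have h2 : Int.xor a 0 = a := by rw [← pvBxor_eq_ixor]; simp
  rw [pvBxor_eq_ixor, pvBxor_eq_ixor, pvIxor_assoc, h1, h2]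

-- max of two "Option Int" values, none = impossible
def omax : Option Int → Option Int → Option Int
  | none, b => b
  | some a, none => some a
  | some a, some b => some (max a b)

-- specification: best l x = max number of elements of l whose xor is x (none = impossible)
def bestOf : List Int → Int → Option Int
  | [], x => if x = 0 then some 0 else none
  | num :: tl, x => omax (bestOf tl x) ((bestOf tl (PySem.Int.bxor x num)).map (· + 1))

theorem bestOf_nonneg : ∀ (l : List Int) (x v : Int), bestOf l x = some v → 0 ≤ v := by
  intro l
  induction l with
  | nil => intro x v h; simp [bestOf] at h; omega
  | cons num tl ih =>
    intro x v h
    simp only [bestOf] at h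
    rcases h1 : bestOf tl x with _ | a <;> rcases h2 : bestOf tl (PySem.Int.bxor x num) with _ | b <;>
      rw [h1, h2] at h <;> simp only [omax, Option.map_none, Option.map_some,
        Option.some.injEq, reduceCtorEq] at h
    · have := ih _ _ h2; omega
    · have := ih _ _ h1; omega
    · have ha := ih _ _ h1
      have : (0:Int) ≤ max a (b + 1) := le_trans ha (le_max_left _ _)
      linarith [h]

theorem omax_none_right (a : Option Int) : omax a none = a := by cases a <;> rfl

theorem omax_mid_swap (a b c d : Option Int) :
    omax (omax a b) (omax c d) = omax (omax a c) (omax b d) := by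
  rcases a with _ | a <;> rcases b with _ | b <;> rcases c with _ | c <;> rcases d with _ | d <;>
    simp [omax] <;> omega

theorem omax_map_succ (a b : Option Int) :
    (omax a b).map (· + 1) = omax (a.map (· + 1)) (b.map (· + 1)) := by
  rcases a with _ | a <;> rcases b with _ | b <;> simp [omax]

theorem bestOf_snoc (P : List Int) (num : Int) : ∀ x,
    bestOf (P ++ [num]) x = omax (bestOf P x) ((bestOf P (PySem.Int.bxor x num)).map (· + 1)) := by
  induction P with
  | nil => intro x; rfl
  | cons h P ih =>
    intro x
    have hx : PySem.Int.bxor (PySem.Int.bxor x h) num = PySem.Int.bxor (PySem.Int.bxor x num) h := by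
      simp only [pvBxor_eq_ixor]
      rw [pvIxor_assoc, pvIxor_assoc, pvIxor_comm h num]
    simp only [List.cons_append, bestOf]
    rw [ih, ih, omax_map_succ, hx, omax_map_succ]
    exact omax_mid_swap _ _ _ _

-- ---------- A side ----------

theorem find?_unique_key {β : Type} (pred : Int × β → Bool) :
    ∀ (l : List (Int × β)) (q : Int × β), (l.map Prod.fst).Nodup → q ∈ l → pred q = true →
    (∀ p ∈ l, pred p = true → p.1 = q.1) → l.find? pred = some q := by
  intro l
  induction l with
  | nil => intro q _ hq; simp at hq
  | cons h tl ih =>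
    intro q hnd hq hpq huniq
    simp only [List.map_cons, List.nodup_cons] at hnd
    by_cases hph : pred h = true
    · have h1 : h.1 = q.1 := huniq h (by simp) hph
      rcases List.mem_cons.mp hq with hq | hq
      · simp [List.find?, hph, hq]
      · exact absurd (h1 ▸ (List.mem_map_of_mem hq : q.1 ∈ tl.map Prod.fst)) hnd.1
    · have hq' : q ∈ tl := by
        rcases List.mem_cons.mp hq with hq | hq
        · exact absurd (hq ▸ hpq) hph
        · exact hq
      have : tl.find? pred = some q :=
        ih q hnd.2 hq' hpq (fun p hp => huniq p (List.mem_cons_of_mem _ hp))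
      simp [List.find?, hph, this]

theorem innerfold_untouched (num : Int) :
    ∀ (items : List (Int × Int)) (ns : PySem.Dict Int Int) (x : Int),
    (∀ p ∈ items, PySem.Int.bxor p.1 num ≠ x) →
    (items.foldl
        (fun ns p =>
          ns.insert (PySem.Int.bxor p.1 num)
            (max (ns.getD (PySem.Int.bxor p.1 num) 0) (p.2 + 1)))
        ns).get? x = ns.get? x := by
  intro items
  induction items with
  | nil => intro ns x _; rfl
  | cons p tl ih =>
    intro ns x h
    simp only [List.foldl_cons]
    rw [ih _ x (fun q hq => h q (List.mem_cons_of_mem _ hq)),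
      PySem.Dict.get?_insert_of_ne _ _ (fun he => h p (by simp) he.symm)]

theorem innerfold_get? (num : Int) :
    ∀ (items : List (Int × Int)) (ns : PySem.Dict Int Int) (x : Int),
    (items.map Prod.fst).Nodup →
    (items.foldl
        (fun ns p =>
          ns.insert (PySem.Int.bxor p.1 num)
            (max (ns.getD (PySem.Int.bxor p.1 num) 0) (p.2 + 1)))
        ns).get? x =
      (match items.find? (fun p => PySem.Int.bxor p.1 num == x) with
        | some q => some (max (ns.getD x 0) (q.2 + 1))
        | none => ns.get? x) := by
  intro items
  induction items with
  | nil => intro ns x _; rfl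
  | cons p tl ih =>
    intro ns x hnd
    simp only [List.map_cons, List.nodup_cons] at hnd
    by_cases hk : PySem.Int.bxor p.1 num = x
    · have hfind : (p :: tl).find? (fun p => PySem.Int.bxor p.1 num == x) = some p := by
        simp [List.find?, hk]
      rw [hfind]
      simp only [List.foldl_cons]
      have huntouched : ∀ q ∈ tl, PySem.Int.bxor q.1 num ≠ x := by
        intro q hq he
        have : q.1 = p.1 := by
          have := he.trans hk.symm
          have h2 := congrArg (fun z => PySem.Int.bxor z num) this
          simpa [pvBxor_cancel] using h2
        exact hnd.1 (this ▸ List.mem_map_of_mem hq)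
      rw [innerfold_untouched num tl _ x huntouched, hk, PySem.Dict.get?_insert_self]
    · have hkf : (PySem.Int.bxor p.1 num == x) = false := by simpa using hk
      have hfind : (p :: tl).find? (fun p => PySem.Int.bxor p.1 num == x) =
          tl.find? (fun p => PySem.Int.bxor p.1 num == x) := by
        simp [List.find?, hkf]
      rw [hfind]
      simp only [List.foldl_cons]
      rw [ih _ x hnd.2]
      have hne : x ≠ PySem.Int.bxor p.1 num := fun h => hk h.symm
      rcases hf : tl.find? (fun p => PySem.Int.bxor p.1 num == x) with _ | q
      · simp [hf, PySem.Dict.get?_insert_of_ne _ _ hne]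
      · simp [hf, PySem.Dict.getD_insert_of_ne _ _ _ hne]

-- one outer-loop iteration of A: if dp represents bestOf P, the rebuilt dict represents bestOf (P ++ [num])
theorem outer_step (num : Int) (dp : PySem.Dict Int Int) (P : List Int)
    (ihnd : dp.keys.Nodup) (ihget : ∀ x, dp.get? x = bestOf P x) :
    (dp.items.foldl
        (fun ns p =>
          ns.insert (PySem.Int.bxor p.1 num)
            (max (ns.getD (PySem.Int.bxor p.1 num) 0) (p.2 + 1)))
        dp).keys.Nodup ∧
    ∀ x, (dp.items.foldl
        (fun ns p =>
          ns.insert (PySem.Int.bxor p.1 num)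
            (max (ns.getD (PySem.Int.bxor p.1 num) 0) (p.2 + 1)))
        dp).get? x = bestOf (P ++ [num]) x := by
  constructor
  · exact PySem.Dict.nodup_keys_foldl_insert_key dp.items (fun p => PySem.Int.bxor p.1 num)
      (fun ns p => max (ns.getD (PySem.Int.bxor p.1 num) 0) (p.2 + 1)) dp ihnd
  · intro x
    rw [innerfold_get? num dp.items dp x (by simpa [PySem.Dict.keys] using ihnd)]
    rw [bestOf_snoc]
    rcases hq : dp.get? (PySem.Int.bxor x num) with _ | s
    · have hfind : dp.items.find? (fun p => PySem.Int.bxor p.1 num == x) = none := by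
        rw [List.find?_eq_none]
        intro p hp hpe
        have hpx : PySem.Int.bxor p.1 num = x := by simpa using hpe
        have hp1 : p.1 = PySem.Int.bxor x num := by
          have := congrArg (fun z => PySem.Int.bxor z num) hpx
          simpa [pvBxor_cancel] using this
        have hp' : (PySem.Int.bxor x num, p.2) ∈ dp.items := by
          rwa [show p = (PySem.Int.bxor x num, p.2) from Prod.ext hp1 rfl] at hp
        have := PySem.Dict.get?_of_mem_items dp hp' ihnd
        rw [hq] at this; simp at this
      rw [hfind, ihget x, ← ihget (PySem.Int.bxor x num), hq]
      simp [omax_none_right]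
    · have hmem : (PySem.Int.bxor x num, s) ∈ dp.items := PySem.Dict.mem_items_of_get?_eq_some dp hq
      have hfind : dp.items.find? (fun p => PySem.Int.bxor p.1 num == x) =
          some (PySem.Int.bxor x num, s) := by
        apply find?_unique_key _ dp.items _ (by simpa [PySem.Dict.keys] using ihnd) hmem
        · simp [pvBxor_cancel]
        · intro p hp hpe
          have hpx : PySem.Int.bxor p.1 num = x := by simpa using hpe
          have := congrArg (fun z => PySem.Int.bxor z num) hpx
          simpa [pvBxor_cancel] using this
      rw [hfind]
      have hsx : bestOf P (PySem.Int.bxor x num) = some s :=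
        (ihget (PySem.Int.bxor x num)).symm.trans hq
      have hs0 : 0 ≤ s := bestOf_nonneg P _ s hsx
      rw [hsx]
      rcases hbx : bestOf P x with _ | v
      · rw [PySem.Dict.getD_eq_get?_getD, ihget x, hbx]
        simp only [Option.getD_none]
        rw [max_eq_right (by omega : (0:Int) ≤ s + 1)]
        rfl
      · rw [PySem.Dict.getD_eq_get?_getD, ihget x, hbx]
        simp only [Option.getD_some]
        rfl

-- the outer loop of A: its dict always has nodup keys and represents bestOf of the processed prefix
theorem outer_inv (nums : List Int) :
    (nums.foldl
      (fun dp num =>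
        dp.items.foldl
          (fun ns p =>
            ns.insert (PySem.Int.bxor p.1 num)
              (max (ns.getD (PySem.Int.bxor p.1 num) 0) (p.2 + 1)))
          dp)
      ((PySem.Dict.ofList [(0, 0)]) : PySem.Dict Int Int)).keys.Nodup ∧
    ∀ x, (nums.foldl
      (fun dp num =>
        dp.items.foldl
          (fun ns p =>
            ns.insert (PySem.Int.bxor p.1 num)
              (max (ns.getD (PySem.Int.bxor p.1 num) 0) (p.2 + 1)))
          dp)
      ((PySem.Dict.ofList [(0, 0)]) : PySem.Dict Int Int)).get? x = bestOf nums x := by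
  induction nums using List.reverseRecOn with
  | nil =>
    constructor
    · decide
    · intro x
      by_cases hx : x = 0
      · subst hx; decide
      · rw [List.foldl_nil, show PySem.Dict.ofList [((0:Int), (0:Int))] = PySem.Dict.empty.insert 0 0 from rfl,
          PySem.Dict.get?_insert_of_ne _ _ (fun h => hx h), PySem.Dict.get?_empty]
        simp [bestOf, hx]
  | append_singleton P num ih =>
    rw [List.foldl_append, List.foldl_cons, List.foldl_nil]
    exact outer_step num _ P ih.1 ih.2

-- ---------- B side ----------

def goodMemo (nums : List Int) (memo : PySem.Dict (Int × Int) (Option Int)) : Prop :=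
  ∀ (s : List Int) (x : Int) (v : Option Int), s <:+ nums →
    memo.get? ((s.length : Int), x) = some v → v = bestOf s x

theorem suffix_unique {α : Type} {s1 s2 l : List α}
    (h1 : s1 <:+ l) (h2 : s2 <:+ l) (h : s1.length = s2.length) : s1 = s2 := by
  obtain ⟨t1, ht1⟩ := h1
  obtain ⟨t2, ht2⟩ := h2
  have hl1 : l.drop t1.length = s1 := by rw [← ht1]; simp
  have hl2 : l.drop t2.length = s2 := by rw [← ht2]; simp
  have : t1.length = t2.length := by
    have e1 := congrArg List.length ht1
    have e2 := congrArg List.length ht2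
    simp at e1 e2; omega
  rw [← hl1, ← hl2, this]

theorem altGo_correct (nums : List Int) :
    ∀ (rest : List Int), rest <:+ nums → ∀ (x : Int) memo, goodMemo nums memo →
    (altGo rest x memo).1 = bestOf rest x ∧ goodMemo nums (altGo rest x memo).2 := by
  intro rest
  induction rest with
  | nil =>
    intro _ x memo hg
    constructor
    · simp [altGo, bestOf]
    · simpa [altGo] using hg
  | cons num tl ih =>
    intro hsuf x memo hg
    have htl : tl <:+ nums := (List.suffix_cons num tl).trans hsuf
    simp only [altGo]
    rcases hm : memo.get? (((num :: tl).length : Int), x) with _ | v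
    · simp only
      obtain ⟨ihv1, ihg1⟩ := ih htl x memo hg
      obtain ⟨ihv2, ihg2⟩ := ih htl (PySem.Int.bxor x num) _ ihg1
      have hval :
          (match (altGo tl (PySem.Int.bxor x num) (altGo tl x memo).2).1, (altGo tl x memo).1 with
            | some t, none => some (t + 1)
            | some t, some s => if t + 1 > s then some (t + 1) else some s
            | none, b => b) = bestOf (num :: tl) x := by
        rw [ihv1, ihv2]
        show _ = omax (bestOf tl x) ((bestOf tl (PySem.Int.bxor x num)).map (· + 1))
        rcases bestOf tl (PySem.Int.bxor x num) with _ | t <;> rcases bestOf tl x with _ | s <;>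
          simp [omax]
        split_ifs <;> simp <;> omega
      refine ⟨hval, ?_⟩
      intro s x' v' hs hget
      rw [PySem.Dict.get?_insert] at hget
      split_ifs at hget with hkey
      · have hk1 : (s.length : Int) = ((num :: tl).length : Int) := congrArg Prod.fst hkey
        have hk2 : x' = x := congrArg Prod.snd hkey
        have hlen : s.length = (num :: tl).length := by exact_mod_cast hk1
        have hseq : s = num :: tl := suffix_unique hs hsuf hlen
        rw [hseq, hk2, ← hval]
        exact (Option.some.inj hget).symm
      · exact ihg2 s x' v' hs hget
    · simp only
      exact ⟨hg (num :: tl) x v hsuf hm, hg⟩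

-- ===== VERDICT (by name: the statement is the Claim_ definition above) =====
theorem minRemovals_spec : Claim_equal_minRemovals := by
  unfold Claim_equal_minRemovals
  intro nums target _
  unfold Spec_minRemovals minRemovals minRemovals_alt
  obtain ⟨hnd, hget⟩ := outer_inv nums
  have hb := (altGo_correct nums nums List.suffix_rfl target PySem.Dict.empty
    (by intro s x v _ h; simp [PySem.Dict.get?_empty] at h)).1
  simp only
  rw [PySem.Dict.contains_eq_isSome_get?, hget, hb]
  rcases h : bestOf nums target with _ | b
  · simp
  · rw [PySem.Dict.getD_eq_get?_getD, hget, h]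
    simp
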